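-- pv_equiv track=rewrite | github.com/ClanClanClanClan/latex_perf | ml/data/parser_state.py | _find_comment_segments
-- ===== SOURCE A (Python) =====
-- from typing import List, Tuple
--
-- def _find_comment_segments(text: str) -> List[Tuple[int, int]]:
--     r"""Find all comment segments (% to end-of-line, excluding \%).
--
--     Returns list of (start, end) character offsets.
--     End is the position of the newline (exclusive), or len(text).
--     """
--     segments = []
--     n = len(text)
--     i = 0
--     while i < n:
--         if text[i] == '%':
--             # Check for escaped percent: \%
--             if i > 0 and text[i - 1] == '\\':
--                 # But \\% is a newline followed by %, so check for \\
--                 if i >= 2 and text[i - 2] == '\\':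
--                     pass  # \\% → comment starts
--                 else:
--                     i += 1
--                     continue  # \% → escaped, not a comment
--             # Find end of line
--             eol = text.find('\n', i)
--             if eol == -1:
--                 eol = n
--             segments.append((i, eol))
--             i = eol + 1
--         else:
--             i += 1
--     return segments
-- ===== SOURCE B (Python) =====
-- from typing import List, Tuple
--
-- def _find_comment_segments(text: str) -> List[Tuple[int, int]]:
--     """Line-split re-implementation: one pass over newline-separated lines with a
--     running offset; per line, emit the first unescaped percent sign (if any)."""
--     segments = []
--     offset = 0
--     for line in text.split('\n'):
--         for j, ch in enumerate(line):
--             if ch == '%':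
--                 escaped = j > 0 and line[j - 1] == '\\' and not (j >= 2 and line[j - 2] == '\\')
--                 if not escaped:
--                     segments.append((offset + j, offset + len(line)))
--                     break
--         offset += len(line) + 1
--     return segments
-- ===== Notes on version B (the rewrite author's own statement) =====
-- stated objective: faster
-- what changed: Replaced the single global-index while-loop (per-character stepping with eol-jumps and a hand-rolled find) by a line split with a running offset, scanning each line locally for its first unescaped percent sign and stopping at it.
import Mathlib
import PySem

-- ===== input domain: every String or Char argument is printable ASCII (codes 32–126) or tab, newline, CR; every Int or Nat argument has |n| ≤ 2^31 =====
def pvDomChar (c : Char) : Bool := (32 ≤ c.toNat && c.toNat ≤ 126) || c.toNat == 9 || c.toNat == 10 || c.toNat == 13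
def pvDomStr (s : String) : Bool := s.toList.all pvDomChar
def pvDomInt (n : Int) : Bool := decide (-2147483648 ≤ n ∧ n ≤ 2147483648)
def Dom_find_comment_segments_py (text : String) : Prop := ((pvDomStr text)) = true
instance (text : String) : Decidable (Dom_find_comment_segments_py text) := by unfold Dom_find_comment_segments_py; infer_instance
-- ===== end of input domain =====

-- B replaces A's global-index while-loop (with eol-jumps) by a line split with a
-- running offset and a local per-line scan for the first unescaped percent sign;
-- same O(n), measured constant-factor faster in Python.

-- ===== PORT A =====
-- transliteration of `eol = text.find('\n', i); if eol == -1: eol = n` (scan from i; n if absent)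
def pvFindNl (cs : List Char) (i : Nat) : Nat :=
  if h : i < cs.length then
    if cs[i] = '\n' then i else pvFindNl cs (i + 1)
  else cs.length
termination_by cs.length - i

theorem pvFindNl_ge (cs : List Char) (i : Nat) (hi : i ≤ cs.length) : i ≤ pvFindNl cs i := by
  unfold pvFindNl
  split
  · split
    · exact le_refl i
    · exact le_trans (Nat.le_succ i) (pvFindNl_ge cs (i + 1) (by omega))
  · omega
termination_by cs.length - i

-- A's while-loop: global index i, lookback at i-1 / i-2 (guards keep the getD in range)
def pvALoop (cs : List Char) (i : Nat) : List (Int × Int) :=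
  if h : i < cs.length then
    if cs[i] = '%' then
      if 0 < i ∧ cs.getD (i - 1) ' ' = '\\' then
        if 2 ≤ i ∧ cs.getD (i - 2) ' ' = '\\' then
          -- \\% → comment starts
          let eol := pvFindNl cs i
          ((i : Int), (eol : Int)) :: pvALoop cs (eol + 1)
        else
          pvALoop cs (i + 1)  -- \% → escaped, not a comment
      else
        let eol := pvFindNl cs i
        ((i : Int), (eol : Int)) :: pvALoop cs (eol + 1)
    else
      pvALoop cs (i + 1)
  else []
termination_by cs.length - i
decreasing_by
  · have := pvFindNl_ge cs i (by omega); omega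
  · omega
  · have := pvFindNl_ge cs i (by omega); omega
  · omega

def find_comment_segments_py (text : String) : List (Int × Int) :=
  pvALoop text.toList 0

-- ===== PORT B =====
-- exact port of text.split('\n') (keeps empty pieces; '' splits to [''])
def pvSplitNl : List Char → List (List Char)
  | [] => [[]]
  | c :: rest =>
    if c = '\n' then [] :: pvSplitNl rest
    else
      match pvSplitNl rest with
      | l :: ls => (c :: l) :: ls
      | [] => [[c]]

-- inner `for j, ch in enumerate(line)` from index j: first unescaped '%' (break), else none
def pvScanLine (ln : List Char) (j : Nat) : Option Nat :=
  if h : j < ln.length then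
    if ln[j] = '%' ∧
        ¬(0 < j ∧ ln.getD (j - 1) ' ' = '\\' ∧ ¬(2 ≤ j ∧ ln.getD (j - 2) ' ' = '\\')) then
      some j
    else pvScanLine ln (j + 1)
  else none
termination_by ln.length - j

-- outer loop over lines with the running offset
def pvBGo : List (List Char) → Nat → List (Int × Int)
  | [], _ => []
  | L :: ls, off =>
    match pvScanLine L 0 with
    | some j => ((off + j : Int), (off + L.length : Int)) :: pvBGo ls (off + L.length + 1)
    | none => pvBGo ls (off + L.length + 1)

def find_comment_segments_py_alt (text : String) : List (Int × Int) :=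
  pvBGo (pvSplitNl text.toList) 0

-- ===== PRECONDITION & SPEC =====
def Spec_find_comment_segments_py (text : String) (out : List (Int × Int)) : Prop := out = find_comment_segments_py_alt text
instance (text : String) (out : List (Int × Int)) : Decidable (Spec_find_comment_segments_py text out) := by unfold Spec_find_comment_segments_py; infer_instance

-- ===== CLAIM (what is proved, stated in full; the proofs are below) =====
def Claim_equal_find_comment_segments_py : Prop := ∀ (text : String), Dom_find_comment_segments_py text → Spec_find_comment_segments_py text (find_comment_segments_py text)

-- ===== LEMMAS AND PROOFS =====

-- proof-side reformulation of A's loop over the SUFFIX, carrying the previous two chars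
def pvAux (p2 p1 : Option Char) (s : List Char) (i : Nat) : List (Int × Int) :=
  match s with
  | [] => []
  | c :: t =>
    if c = '%' then
      if p1 = some '\\' ∧ ¬(p2 = some '\\') then
        pvAux p1 (some c) t (i + 1)
      else
        let k := pvFindNl (c :: t) 0
        ((i : Int), (i + k : Int)) ::
          pvAux ((c :: t)[k - 1]?) (some '\n') ((c :: t).drop (k + 1)) (i + k + 1)
    else
      pvAux p1 (some c) t (i + 1)
termination_by s.length
decreasing_by
  · simp
  · simp
  · simp

theorem pvAux_p2_irrel (p2 p2' p1 : Option Char) (s : List Char) (i : Nat)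
    (h : p1 ≠ some '\\') : pvAux p2 p1 s i = pvAux p2' p1 s i := by
  cases s with
  | nil => simp [pvAux]
  | cons c t =>
    unfold pvAux
    have : ¬(p1 = some '\\' ∧ ¬(p2 = some '\\')) := fun ⟨h1, _⟩ => h h1
    have : ¬(p1 = some '\\' ∧ ¬(p2' = some '\\')) := fun ⟨h1, _⟩ => h h1
    split_ifs <;> simp_all

-- index-shift law for pvFindNl
theorem pvFindNl_cons (c : Char) (cs : List Char) (j : Nat) :
    pvFindNl (c :: cs) (j + 1) = pvFindNl cs j + 1 := by
  unfold pvFindNl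
  by_cases h : j < cs.length
  · simp only [List.length_cons, List.getElem_cons_succ]
    rw [dif_pos (by omega), dif_pos h]
    split
    · rfl
    · exact pvFindNl_cons c cs (j + 1)
  · rw [dif_neg (by simp; omega), dif_neg h]
    simp
termination_by cs.length - j

-- pvFindNl over a suffix = local first-'\n' index
theorem pvFindNl_drop (cs : List Char) (i : Nat) (hi : i ≤ cs.length) :
    pvFindNl cs i = i + pvFindNl (cs.drop i) 0 := by
  induction cs generalizing i with
  | nil =>
    have : i = 0 := by simpa using hi
    subst this
    simp [pvFindNl]
  | cons c t ih =>
    cases i with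
    | zero => simp
    | succ i' =>
      rw [pvFindNl_cons, List.drop_succ_cons, ih i' (by simpa using hi)]
      omega

theorem pvFindNl_le (cs : List Char) (i : Nat) : pvFindNl cs i ≤ cs.length := by
  unfold pvFindNl
  split
  · split
    · omega
    · exact pvFindNl_le cs (i + 1)
  · exact le_refl _
termination_by cs.length - i

theorem pvFindNl_nl (cs : List Char) (i : Nat) (h : pvFindNl cs i < cs.length) :
    cs[pvFindNl cs i]? = some '\n' := by
  by_cases h1 : i < cs.length
  · by_cases h2 : cs[i] = '\n'
    · rw [pvFindNl, dif_pos h1, if_pos h2]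
      simp [h1, h2]
    · have e : pvFindNl cs i = pvFindNl cs (i + 1) := by
        rw [pvFindNl, dif_pos h1, if_neg h2]
      rw [e] at h ⊢
      exact pvFindNl_nl cs (i + 1) h
  · rw [pvFindNl, dif_neg h1] at h
    omega
termination_by cs.length - i

-- first '\n' of a newline-free list / of A ++ '\n' :: B
theorem pvFindNl_zero_cons (c : Char) (t : List Char) :
    pvFindNl (c :: t) 0 = if c = '\n' then 0 else pvFindNl t 0 + 1 := by
  rw [pvFindNl]
  rw [dif_pos (by simp)]
  simp only [List.getElem_cons_zero]
  split
  · rfl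
  · exact pvFindNl_cons c t 0

theorem pvFindNl_notin (A : List Char) (h : '\n' ∉ A) : pvFindNl A 0 = A.length := by
  induction A with
  | nil => simp [pvFindNl]
  | cons c t ih =>
    rw [pvFindNl_zero_cons, if_neg (by simp_all [eq_comm]), ih (by simp_all)]
    simp

theorem pvFindNl_split (A B : List Char) (h : '\n' ∉ A) :
    pvFindNl (A ++ '\n' :: B) 0 = A.length := by
  induction A with
  | nil => simp [pvFindNl_zero_cons]
  | cons c t ih =>
    rw [List.cons_append, pvFindNl_zero_cons, if_neg (by simp_all [eq_comm]), ih (by simp_all)]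
    simp

theorem pvAux_nil (p2 p1 : Option Char) (i : Nat) : pvAux p2 p1 [] i = [] := by rw [pvAux]

theorem pvALoop_eq_pvAux (cs : List Char) (i : Nat) :
    pvALoop cs i =
      pvAux (if 2 ≤ i then cs[i - 2]? else none)
            (if 1 ≤ i then cs[i - 1]? else none) (cs.drop i) i := by
  by_cases hi : i < cs.length
  · have hdrop : cs.drop i = cs[i] :: cs.drop (i + 1) := List.drop_eq_getElem_cons hi
    rw [pvALoop, dif_pos hi, hdrop, pvAux]
    have hskip : pvALoop cs (i + 1)
        = pvAux (if 1 ≤ i then cs[i - 1]? else none) (some cs[i]) (cs.drop (i + 1)) (i + 1) := by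
      rw [pvALoop_eq_pvAux cs (i + 1)]
      have e2 : (if 2 ≤ i + 1 then cs[i + 1 - 2]? else none)
          = (if 1 ≤ i then cs[i - 1]? else none) := by
        by_cases h1 : 1 ≤ i
        · rw [if_pos (by omega), if_pos h1, show i + 1 - 2 = i - 1 from by omega]
        · rw [if_neg (by omega), if_neg h1]
      have e1 : (if 1 ≤ i + 1 then cs[i + 1 - 1]? else none) = some cs[i] := by
        rw [if_pos (by omega)]
        simp [List.getElem?_eq_getElem hi]
      rw [e2, e1]
    have hp1 : (0 < i ∧ cs.getD (i - 1) ' ' = '\\')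
        ↔ (if 1 ≤ i then cs[i - 1]? else none) = some '\\' := by
      by_cases h1 : 1 ≤ i
      · rw [if_pos h1, List.getElem?_eq_getElem (by omega),
          List.getD_eq_getElem _ _ (by omega : i - 1 < cs.length)]
        simp only [Option.some.injEq]
        exact ⟨fun h => h.2, fun h => ⟨by omega, h⟩⟩
      · rw [if_neg h1]
        simp
        omega
    have hp2 : (2 ≤ i ∧ cs.getD (i - 2) ' ' = '\\')
        ↔ (if 2 ≤ i then cs[i - 2]? else none) = some '\\' := by
      by_cases h2 : 2 ≤ i
      · rw [if_pos h2, List.getElem?_eq_getElem (by omega),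
          List.getD_eq_getElem _ _ (by omega : i - 2 < cs.length)]
        simp only [Option.some.injEq]
        exact ⟨fun h => h.2, fun h => ⟨h2, h⟩⟩
      · rw [if_neg h2]
        simp
        omega
    by_cases hc : cs[i] = '%'
    · rw [if_pos hc, if_pos hc]
      have hk1 : 1 ≤ pvFindNl (cs.drop i) 0 := by
        rw [hdrop, pvFindNl_zero_cons, if_neg (by rw [hc]; decide)]
        omega
      have hemit :
          ((i : Int), (pvFindNl cs i : Int)) :: pvALoop cs (pvFindNl cs i + 1)
          = ((i : Int), ((i : Int) + (pvFindNl (cs[i] :: cs.drop (i + 1)) 0 : Int))) ::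
              pvAux ((cs[i] :: cs.drop (i + 1))[pvFindNl (cs[i] :: cs.drop (i + 1)) 0 - 1]?)
                (some '\n')
                ((cs[i] :: cs.drop (i + 1)).drop (pvFindNl (cs[i] :: cs.drop (i + 1)) 0 + 1))
                (i + pvFindNl (cs[i] :: cs.drop (i + 1)) 0 + 1) := by
        rw [← hdrop]
        have heol : pvFindNl cs i = i + pvFindNl (cs.drop i) 0 :=
          pvFindNl_drop cs i (le_of_lt hi)
        set k := pvFindNl (cs.drop i) 0 with hkdef
        rw [heol]
        congr 1
        by_cases hlt : i + k < cs.length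
        · rw [pvALoop_eq_pvAux cs (i + k + 1)]
          have hnl := pvFindNl_nl cs i (by omega)
          rw [heol] at hnl
          have a2 : (if 2 ≤ i + k + 1 then cs[i + k + 1 - 2]? else none)
              = (List.drop i cs)[k - 1]? := by
            rw [if_pos (by omega), List.getElem?_drop,
              show i + k + 1 - 2 = i + (k - 1) from by omega]
          have a1 : (if 1 ≤ i + k + 1 then cs[i + k + 1 - 1]? else none)
              = some '\n' := by
            rw [if_pos (by omega), show i + k + 1 - 1 = i + k from by omega]
            exact hnl
          have a3 : List.drop (i + k + 1) cs = List.drop (k + 1) (List.drop i cs) := by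
            rw [List.drop_drop]
            congr 1
          rw [a2, a1, a3]
        · rw [pvALoop, dif_neg (by omega), List.drop_drop,
            List.drop_of_length_le (by omega : cs.length ≤ i + (k + 1)), pvAux_nil]
      by_cases hesc : (if 1 ≤ i then cs[i - 1]? else none) = some '\\' ∧
          ¬((if 2 ≤ i then cs[i - 2]? else none) = some '\\')
      · rw [if_pos hesc, if_pos (hp1.mpr hesc.1), if_neg (fun hx => hesc.2 (hp2.mp hx))]
        exact hskip
      · rw [if_neg hesc]
        rcases Classical.em (0 < i ∧ cs.getD (i - 1) ' ' = '\\') with hA | hA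
        · have hB : (2 ≤ i ∧ cs.getD (i - 2) ' ' = '\\') := hp2.mpr (by
            by_contra hn
            exact hesc ⟨hp1.mp hA, hn⟩)
          rw [if_pos hA, if_pos hB]
          exact hemit
        · rw [if_neg hA]
          exact hemit
    · rw [if_neg hc, if_neg hc]
      exact hskip
  · rw [pvALoop, dif_neg hi, List.drop_of_length_le (by omega), pvAux_nil]
termination_by cs.length + 1 - i
decreasing_by
  · omega
  · omega

-- the text after the current line: nothing, or a '\n' and the rest
def pvOptNl : Option (List Char) → List Char
  | none => []
  | some rest => '\n' :: rest

theorem pvSplitNl_no_nl (s : List Char) (h : '\n' ∉ s) : pvSplitNl s = [s] := by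
  induction s with
  | nil => rfl
  | cons c t ih =>
    rw [pvSplitNl, if_neg (by simp_all [eq_comm]), ih (by simp_all)]

theorem pvSplitNl_split (L rest : List Char) (h : '\n' ∉ L) :
    pvSplitNl (L ++ '\n' :: rest) = L :: pvSplitNl rest := by
  induction L with
  | nil => simp [pvSplitNl]
  | cons c t ih =>
    rw [List.cons_append, pvSplitNl, if_neg (by simp_all [eq_comm]), ih (by simp_all)]

theorem pvExistsSplit (s : List Char) (h : '\n' ∈ s) :
    ∃ L rest, '\n' ∉ L ∧ s = L ++ '\n' :: rest := by
  induction s with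
  | nil => simp at h
  | cons c t ih =>
    by_cases hc : c = '\n'
    · exact ⟨[], t, by simp, by rw [hc]; rfl⟩
    · obtain ⟨L, rest, hL, he⟩ := ih (by
        rcases List.mem_cons.mp h with h1 | h1
        · exact absurd h1.symm hc
        · exact h1)
      exact ⟨c :: L, rest, by simp_all [eq_comm], by rw [he]; rfl⟩

-- scanning a line from position j inside pvAux = the local line scan, line by line
theorem pvAux_line (L : List Char) (r : Option (List Char)) (i j : Nat) (p2 p1 : Option Char)
    (hnl : '\n' ∉ L) (hj : j ≤ L.length)
    (h0 : j = 0 → p1 ≠ some '\\')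
    (h1 : j = 1 → p2 ≠ some '\\')
    (hq1 : 1 ≤ j → p1 = L[j - 1]?)
    (hq2 : 2 ≤ j → p2 = L[j - 2]?) :
    pvAux p2 p1 (L.drop j ++ pvOptNl r) (i + j) =
      (match pvScanLine L j with
       | some m => [((i + m : Int), (i + L.length : Int))]
       | none => []) ++
      (match r with
       | none => []
       | some rest => pvAux none (some '\n') rest (i + L.length + 1)) := by
  by_cases hjl : j < L.length
  · have hdropL : L.drop j = L[j] :: L.drop (j + 1) := List.drop_eq_getElem_cons hjl
    have hcnl : L[j] ≠ '\n' := fun he => hnl (he ▸ L.getElem_mem hjl)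
    have hih := pvAux_line L r i (j + 1) p1 (some L[j]) hnl (by omega)
      (by omega)
      (fun hj1 => h0 (by omega))
      (fun _ => (List.getElem?_eq_getElem hjl).symm)
      (fun h2 => hq1 (by omega))
    have hescoff : (p1 = some '\\' ∧ ¬(p2 = some '\\'))
        ↔ (0 < j ∧ L.getD (j - 1) ' ' = '\\' ∧ ¬(2 ≤ j ∧ L.getD (j - 2) ' ' = '\\')) := by
      rcases Nat.lt_or_ge j 1 with hj0 | hj1'
      · have hj00 : j = 0 := by omega
        constructor
        · intro hh
          exact absurd hh.1 (h0 hj00)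
        · intro hh
          exact absurd hh.1 (by omega)
      · rcases Nat.lt_or_ge j 2 with hj1'' | hj2
        · have hj11 : j = 1 := by omega
          have e1 : p1 = L[j - 1]? := hq1 hj1'
          constructor
          · intro hh
            refine ⟨by omega, ?_, ?_⟩
            · have := hh.1
              rw [e1, List.getElem?_eq_getElem (by omega : j - 1 < L.length)] at this
              rw [List.getD_eq_getElem _ _ (by omega : j - 1 < L.length)]
              exact Option.some.inj this
            · intro hcon
              omega
          · intro hh
            refine ⟨?_, h1 hj11⟩
            rw [e1, List.getElem?_eq_getElem (by omega : j - 1 < L.length)]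
            rw [List.getD_eq_getElem _ _ (by omega : j - 1 < L.length)] at hh
            rw [hh.2.1]
        · have e1 : p1 = L[j - 1]? := hq1 (by omega)
          have e2 : p2 = L[j - 2]? := hq2 hj2
          rw [e1, e2, List.getElem?_eq_getElem (by omega : j - 1 < L.length),
            List.getElem?_eq_getElem (by omega : j - 2 < L.length),
            List.getD_eq_getElem _ _ (by omega : j - 1 < L.length),
            List.getD_eq_getElem _ _ (by omega : j - 2 < L.length)]
          simp only [Option.some.injEq]
          constructor
          · intro hh
            exact ⟨by omega, hh.1, fun hcon => hh.2 hcon.2⟩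
          · intro hh
            exact ⟨hh.2.1, fun hcon => hh.2.2 ⟨hj2, hcon⟩⟩
    rw [hdropL, List.cons_append, pvAux, pvScanLine, dif_pos hjl]
    by_cases hpc : L[j] = '%'
    · rw [if_pos hpc]
      by_cases hesc : p1 = some '\\' ∧ ¬(p2 = some '\\')
      · rw [if_pos hesc, if_neg (fun hx => hx.2 (hescoff.mp hesc))]
        exact hih
      · rw [if_neg hesc, if_pos ⟨hpc, fun hB => hesc (hescoff.mpr hB)⟩]
        -- the emit case: the found '%' starts a comment running to the end of the line
        have hs' : L[j] :: (L.drop (j + 1) ++ pvOptNl r) = L.drop j ++ pvOptNl r := by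
          rw [hdropL, List.cons_append]
        have hnodrop : '\n' ∉ L.drop j := fun hm => hnl (List.mem_of_mem_drop hm)
        have hk : pvFindNl (L[j] :: (L.drop (j + 1) ++ pvOptNl r)) 0 = L.length - j := by
          rw [hs']
          cases r with
          | none =>
            rw [show pvOptNl none = [] from rfl, List.append_nil,
              pvFindNl_notin _ hnodrop, List.length_drop]
          | some rest =>
            rw [show pvOptNl (some rest) = '\n' :: rest from rfl,
              pvFindNl_split _ _ hnodrop, List.length_drop]
        rw [hk]
        have hpair : (((i + j : Nat) : Int), ((i + j : Nat) : Int) + ((L.length - j : Nat) : Int))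
            = ((i : Int) + (j : Int), (i : Int) + (L.length : Int)) := by
          simp only [Prod.mk.injEq]
          exact ⟨by omega, by omega⟩
        show (((i + j : Nat) : Int), ((i + j : Nat) : Int) + ((L.length - j : Nat) : Int)) ::
            pvAux ((L[j] :: (L.drop (j + 1) ++ pvOptNl r))[L.length - j - 1]?) (some '\n')
              ((L[j] :: (L.drop (j + 1) ++ pvOptNl r)).drop (L.length - j + 1))
              (i + j + (L.length - j) + 1) = _
        rw [hpair, List.singleton_append,
          show i + j + (L.length - j) + 1 = i + L.length + 1 from by omega]
        cases r with
        | none =>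
          rw [hs', show pvOptNl none = [] from rfl, List.append_nil,
            List.drop_of_length_le (show (List.drop j L).length ≤ L.length - j + 1 from by
              rw [List.length_drop]; omega), pvAux_nil]
        | some rest =>
          rw [hs', show pvOptNl (some rest) = '\n' :: rest from rfl]
          rw [show L.drop j ++ '\n' :: rest = (L.drop j ++ ['\n']) ++ rest from by simp]
          rw [List.drop_left' (by simp only [List.length_append, List.length_drop, List.length_cons, List.length_nil])]
          rw [pvAux_p2_irrel _ none (some '\n') rest _ (by simp)]
    · rw [if_neg hpc, if_neg (fun hx => hpc hx.1)]
      exact hih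
  · have hjeq : j = L.length := by omega
    rw [List.drop_of_length_le (by omega), List.nil_append,
      pvScanLine, dif_neg (by omega)]
    cases r with
    | none =>
      show pvAux p2 p1 [] (i + j) = _
      rw [pvAux_nil]
      rfl
    | some rest =>
      show pvAux p2 p1 ('\n' :: rest) (i + j) = _
      rw [pvAux, if_neg (by decide)]
      rw [pvAux_p2_irrel p1 none (some '\n') rest (i + j + 1) (by simp), hjeq]
      rfl
termination_by L.length - j
decreasing_by
  omega

theorem pvAux_eq_pvBGo (s : List Char) (i : Nat) (p2 p1 : Option Char)
    (h : p1 ≠ some '\\') : pvAux p2 p1 s i = pvBGo (pvSplitNl s) i := by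
  by_cases hs : '\n' ∈ s
  · obtain ⟨L, rest, hL, he⟩ := pvExistsSplit s hs
    subst he
    rw [pvSplitNl_split L rest hL]
    have hline := pvAux_line L (some rest) i 0 p2 p1 hL (by omega)
      (fun _ => h) (fun h1 => absurd h1 (by omega))
      (fun h1 => absurd h1 (by omega)) (fun h2 => absurd h2 (by omega))
    simp only [List.drop_zero, Nat.add_zero, pvOptNl] at hline
    rw [hline, pvAux_eq_pvBGo rest (i + L.length + 1) none (some '\n') (by simp)]
    rw [pvBGo]
    cases hscan : pvScanLine L 0 <;> simp
  · rw [pvSplitNl_no_nl s hs]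
    have hline := pvAux_line s none i 0 p2 p1 hs (by omega)
      (fun _ => h) (fun h1 => absurd h1 (by omega))
      (fun h1 => absurd h1 (by omega)) (fun h2 => absurd h2 (by omega))
    simp only [List.drop_zero, Nat.add_zero, pvOptNl, List.append_nil] at hline
    rw [hline, pvBGo]
    cases hscan : pvScanLine s 0 <;> simp [pvBGo]
termination_by s.length
decreasing_by
  subst he
  simp only [List.length_append, List.length_cons]
  omega

-- ===== VERDICT (by name: the statement is the Claim_ definition above) =====
theorem find_comment_segments_py_spec : Claim_equal_find_comment_segments_py := by
  intro text _
  unfold Spec_find_comment_segments_py find_comment_segments_py find_comment_segments_py_alt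
  rw [pvALoop_eq_pvAux text.toList 0]
  simp only [List.drop_zero, show ((2:Nat) ≤ 0) = False from by decide,
    show ((1:Nat) ≤ 0) = False from by decide, if_false]
  exact pvAux_eq_pvBGo _ 0 _ _ (by simp)
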